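-- pv_equiv track=rewrite | github.com/mscaudill/tabbed | sniffing.py | _disjointed
-- ===== SOURCE A (Python) =====
-- from typing import IO, List, Optional, Tuple
--
-- def _disjointed(
--
--     rows: List[List[str]],
--     line_nums: List[int],
-- ) -> int | None:
--     """Locates the largest indexed row that shares nothing in common with
--     all the rows below it.
--
--     Metadata and Header rows likely share no string values in common with
--     data rows. This function finds a largest indexed row that is disjoint
--     with all the rows below it.
--
--     Args:
--         rows:
--             A list of list of representing each file in sample.
--         line_nums:
--             The line numbers of each list in sample accounting for skip rows.
--
--     Returns:
--         An integer line number or None.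
--
--     """
--
--     reversal = reversed(list(zip(line_nums, rows)))
--     # advance iterator to line above last row
--     _, last = next(reversal)
--     seen = [last]
--     for num, row in reversal:
--         if all(set(row).isdisjoint(others) for others in seen):
--             return num
--
--         seen.append(row)
--
--     return None
-- ===== SOURCE B (Python) =====
-- def _disjointed(rows, line_nums):
--     """Return the line number of the largest-indexed non-last row whose
--     values all have their last occurrence in that row, i.e. the row is
--     disjoint from every row below it; None if no such row exists."""
--     pairs = list(zip(line_nums, rows))
--     last_occ = {}
--     for i, (_, row) in enumerate(pairs):
--         for v in row:
--             last_occ[v] = i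
--     for i in range(len(pairs) - 2, -1, -1):
--         num, row = pairs[i]
--         if all(last_occ[v] == i for v in row):
--             return num
--     return None
-- ===== Notes on version B (the rewrite author's own statement) =====
-- stated objective: alternative
-- what changed: Instead of A's bottom-up scan that tests each candidate row for set-disjointness against an ever-growing list of all rows below it, B makes one forward pass building a dict mapping each string value to the largest row index where it occurs, then scans candidates top-down from the second-to-last row and returns the first row all of whose values have their last occurrence in that very row; Pre_ excludes only the inputs with an empty zip(line_nums, rows), where A raises StopIteration.
import Mathlib
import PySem

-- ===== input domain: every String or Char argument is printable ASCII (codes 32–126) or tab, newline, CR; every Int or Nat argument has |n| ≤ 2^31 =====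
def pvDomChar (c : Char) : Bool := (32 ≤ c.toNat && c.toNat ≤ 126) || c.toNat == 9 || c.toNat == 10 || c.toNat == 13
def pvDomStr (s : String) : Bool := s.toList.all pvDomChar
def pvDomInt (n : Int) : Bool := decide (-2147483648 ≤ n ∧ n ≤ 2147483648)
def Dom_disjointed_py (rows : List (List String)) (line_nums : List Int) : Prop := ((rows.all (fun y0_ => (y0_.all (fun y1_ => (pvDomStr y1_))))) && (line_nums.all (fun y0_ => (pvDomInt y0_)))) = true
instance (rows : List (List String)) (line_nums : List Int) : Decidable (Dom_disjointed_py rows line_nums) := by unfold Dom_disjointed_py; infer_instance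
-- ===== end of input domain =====

-- B replaces A's bottom-up pairwise-disjointness scan by a different algorithm: one forward
-- last-occurrence index pass plus a top-down candidate scan; Pre_ excludes only the inputs
-- where A raises StopIteration (empty zip), where B naturally returns none.

-- ===== PORT A =====
-- the 'for num, row in reversal' loop, with 'seen' accumulated by .append
def pvLoopA : List (Int × List String) → List (List String) → Option Int
  | [], _ => none
  | (num, row) :: tl, seen =>
    if seen.all (fun others => (PySem.Set.ofList row).all (fun v => !(others.contains v))) then
      some num
    else
      pvLoopA tl (seen ++ [row])

def disjointed_py (rows : List (List String)) (line_nums : List Int) : Option Int :=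
  match (List.zip line_nums rows).reverse with
  | [] => none   -- 'next(reversal)' raises StopIteration here; excluded by Pre_
  | (_, last) :: rest => pvLoopA rest [last]

-- ===== PORT B =====
-- forward pass of Source B: last_occ[v] = largest zipped index whose row contains v
def pvBuildLastOcc (pairs : List (Int × List String)) : PySem.Dict String Int :=
  pairs.zipIdx.foldl (fun d pi => pi.1.2.foldl (fun d v => d.insert v (pi.2 : Int)) d) PySem.Dict.empty

def disjointed_py_alt (rows : List (List String)) (line_nums : List Int) : Option Int :=
  let pairs := List.zip line_nums rows
  let lastOcc := pvBuildLastOcc pairs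
  (PySem.List.pyRange ((pairs.length : Int) - 2) (-1) (-1)).findSome? (fun i =>
    match PySem.List.pyGet? pairs i with
    | none => none
    | some (num, row) =>
      if row.all (fun v => lastOcc.get? v == some i) then some num else none)

-- ===== PRECONDITION & SPEC =====
-- Pre_ excludes exactly the inputs where zip(line_nums, rows) is empty: there the Python A
-- raises StopIteration instead of returning a value.
def Pre_disjointed_py (rows : List (List String)) (line_nums : List Int) : Prop :=
  rows ≠ [] ∧ line_nums ≠ []
instance (rows : List (List String)) (line_nums : List Int) : Decidable (Pre_disjointed_py rows line_nums) := by unfold Pre_disjointed_py; infer_instance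

def pvWitness_disjointed_py : List (List String) × List Int := ([["a"], ["b"]], [1, 2])

def Spec_disjointed_py (rows : List (List String)) (line_nums : List Int) (out : Option Int) : Prop := out = disjointed_py_alt rows line_nums
instance (rows : List (List String)) (line_nums : List Int) (out : Option Int) : Decidable (Spec_disjointed_py rows line_nums out) := by unfold Spec_disjointed_py; infer_instance

-- ===== CLAIM (what is proved, stated in full; the proofs are below) =====
def Claim_equal_disjointed_py : Prop := ∀ (rows : List (List String)) (line_nums : List Int), Dom_disjointed_py rows line_nums → Pre_disjointed_py rows line_nums → Spec_disjointed_py rows line_nums (disjointed_py rows line_nums)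

-- ===== LEMMAS AND PROOFS =====

-- row and line number at index i of the zipped list (proof-side notation)
def pvRow (pairs : List (Int × List String)) (i : Nat) : List String := (pairs.getD i (0, [])).2
def pvNum (pairs : List (Int × List String)) (i : Nat) : Int := (pairs.getD i (0, [])).1

-- "row i is disjoint from every row strictly below it"
def pvCond (pairs : List (Int × List String)) (i : Nat) : Bool :=
  (pvRow pairs i).all (fun v => !(((pairs.drop (i+1)).map Prod.snd).flatten.contains v))

-- the common reference: scan indices m-1, m-2, …, 0 for the first satisfying pvCond
def pvRef (pairs : List (Int × List String)) (m : Nat) : Option Int :=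
  ((List.range m).reverse).findSome? (fun i => if pvCond pairs i then some (pvNum pairs i) else none)

-- generic findSome? facts
theorem pvFindSome?_map {α β γ : Type} (l : List α) (f : α → β) (g : β → Option γ) :
    (l.map f).findSome? g = l.findSome? (fun a => g (f a)) := by
  induction l with
  | nil => rfl
  | cons a tl ih => simp only [List.map_cons, List.findSome?_cons]; cases g (f a) <;> simp [ih]

theorem pvFindSome?_congr {α β : Type} (l : List α) (f g : α → Option β)
    (h : ∀ a ∈ l, f a = g a) : l.findSome? f = l.findSome? g := by
  induction l with
  | nil => rfl
  | cons a tl ih =>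
    simp only [List.findSome?_cons, h a (List.mem_cons_self ..)]
    cases g a with
    | none => exact ih (fun x hx => h x (List.mem_cons_of_mem _ hx))
    | some b => rfl

-- A's per-step test equals "no value of row occurs in the union of seen"
theorem pvCondA_eq (row : List String) (seen : List (List String)) :
    (seen.all (fun others => (PySem.Set.ofList row).all (fun v => !(others.contains v))))
      = row.all (fun v => !(seen.flatten.contains v)) := by
  rw [Bool.eq_iff_iff]
  simp only [List.all_eq_true, Bool.not_eq_eq_eq_not, Bool.not_true, List.contains_eq_mem,
    decide_eq_false_iff_not, List.mem_flatten, not_exists, PySem.Set.mem_ofList]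
  tauto

-- A's loop in terms of the flattened 'seen'
def pvSpecR : List (Int × List String) → List String → Option Int
  | [], _ => none
  | (num, row) :: tl, u =>
    if row.all (fun v => !(u.contains v)) then some num else pvSpecR tl (u ++ row)

theorem pvLoopA_eq_specR : ∀ (l : List (Int × List String)) (seen : List (List String)),
    pvLoopA l seen = pvSpecR l seen.flatten := by
  intro l
  induction l with
  | nil => intro seen; rfl
  | cons p tl ih =>
    intro seen
    obtain ⟨num, row⟩ := p
    simp only [pvLoopA, pvSpecR, pvCondA_eq]
    split
    · rfl
    · rw [ih, List.flatten_append]; simp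

-- main characterisation of A's scan
theorem pvSpecR_eq_ref (pairs : List (Int × List String)) :
    ∀ (m : Nat) (u : List String), m ≤ pairs.length →
    (∀ v, u.contains v = ((pairs.drop m).map Prod.snd).flatten.contains v) →
    pvSpecR ((pairs.take m).reverse) u = pvRef pairs m := by
  intro m
  induction m with
  | zero => intro u _ _; simp [pvRef, pvSpecR]
  | succ m ih =>
    intro u hm hu
    have hmlt : m < pairs.length := by omega
    have htake : pairs.take (m+1) = pairs.take m ++ [pairs.getD m (0, [])] := by
      rw [List.take_add_one, List.getD_eq_getElem?_getD, List.getElem?_eq_getElem hmlt]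
      rfl
    have hdrop : pairs.drop m = pairs.getD m (0, []) :: pairs.drop (m+1) := by
      rw [List.getD_eq_getElem?_getD, List.getElem?_eq_getElem hmlt]
      exact List.drop_eq_getElem_cons hmlt
    have hrange : (List.range (m+1)).reverse = m :: (List.range m).reverse := by
      rw [List.range_succ, List.reverse_append]; rfl
    rw [htake, List.reverse_append]
    simp only [List.reverse_singleton, List.singleton_append]
    have hcond : ((pairs.getD m (0, [])).2.all (fun v => !(u.contains v))) = pvCond pairs m := by
      unfold pvCond pvRow
      refine List.all_congr rfl ?_
      intro v
      try intro _
      rw [hu v]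
    unfold pvRef
    rw [hrange, List.findSome?_cons]
    simp only [pvSpecR, hcond]
    cases hc : pvCond pairs m with
    | true => simp [pvNum]
    | false =>
      simp only [Bool.false_eq_true, if_false]
      have harg : ∀ v : String, ((u ++ (pairs.getD m (0, [])).2).contains v)
          = ((pairs.drop m).map Prod.snd).flatten.contains v := by
        intro v
        have hu' : (v ∈ u) ↔ v ∈ ((pairs.drop (m+1)).map Prod.snd).flatten := by
          have h := hu v
          simp only [List.contains_eq_mem] at h
          exact decide_eq_decide.1 h
        rw [hdrop]
        simp only [List.map_cons, List.flatten_cons, List.contains_eq_mem, List.mem_append]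
        rw [decide_eq_decide]
        tauto
      rw [ih (u ++ (pairs.getD m (0, [])).2) (by omega) harg]
      rfl

-- get? after a fold of constant-value inserts
theorem pvFoldInsert_get? (c : Int) :
    ∀ (l : List String) (d : PySem.Dict String Int) (x : String),
    ((l.foldl (fun d v => d.insert v c) d).get? x) = if x ∈ l then some c else d.get? x := by
  intro l
  induction l with
  | nil => intro d x; simp
  | cons a tl ih =>
    intro d x
    simp only [List.foldl_cons, ih, PySem.Dict.get?_insert, List.mem_cons]
    by_cases hx : x ∈ tl
    · simp [hx]
    · by_cases hxa : x = a <;> simp [hx, hxa]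

-- zipIdx over an appended singleton
theorem pvZipIdx_append_singleton {α : Type} (l : List α) (p : α) :
    ∀ (n : Nat), (l ++ [p]).zipIdx n = l.zipIdx n ++ [(p, n + l.length)] := by
  induction l with
  | nil => intro n; simp
  | cons a tl ih =>
    intro n
    simp only [List.cons_append, List.zipIdx_cons, ih (n+1), List.length_cons]
    have : n + 1 + tl.length = n + (tl.length + 1) := by omega
    rw [this]

-- last-occurrence dict on an appended row
theorem pvBuildLastOcc_append (ps : List (Int × List String)) (p : Int × List String) (v : String) :
    (pvBuildLastOcc (ps ++ [p])).get? v
      = if v ∈ p.2 then some (ps.length : Int) else (pvBuildLastOcc ps).get? v := by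
  unfold pvBuildLastOcc
  rw [pvZipIdx_append_singleton, List.foldl_append]
  simp only [List.foldl_cons, List.foldl_nil, Nat.zero_add]
  rw [pvFoldInsert_get?]

-- the dict test "last_occ[v] == i" characterises disjointness from the rows below
theorem pvLastOcc_char (pairs : List (Int × List String)) :
    ∀ (i : Nat) (v : String), i < pairs.length → v ∈ pvRow pairs i →
    ((pvBuildLastOcc pairs).get? v = some (i : Int)
      ↔ v ∉ ((pairs.drop (i+1)).map Prod.snd).flatten) := by
  induction pairs using List.reverseRecOn with
  | nil => intro i v hi; simp at hi
  | append_singleton ps p ih =>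
    intro i v hi hv
    rw [pvBuildLastOcc_append]
    rcases Nat.lt_or_ge i ps.length with hilt | hige
    · have hrow : pvRow (ps ++ [p]) i = pvRow ps i := by
        unfold pvRow
        rw [List.getD_append _ _ _ _ hilt]
      have hdrop : (ps ++ [p]).drop (i+1) = ps.drop (i+1) ++ [p] := by
        exact List.drop_append_of_le_length (by omega)
      rw [hdrop]
      by_cases hvp : v ∈ p.2
      · have hne : ¬ ((ps.length : Int) = (i : Int)) := by
          intro h
          have : ps.length = i := by exact_mod_cast h
          omega
        simp only [hvp, if_true]
        constructor
        · intro h; exact absurd (Option.some.inj h) hne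
        · intro h
          exfalso
          apply h
          simp only [List.map_append, List.flatten_append, List.mem_append]
          right
          simpa using hvp
      · simp only [hvp, if_false]
        rw [ih i v hilt (by rwa [hrow] at hv)]
        simp only [List.map_append, List.flatten_append, List.mem_append]
        constructor
        · intro h hmem
          rcases hmem with h1 | h2
          · exact h h1
          · simp at h2; exact hvp h2
        · intro h h1
          exact h (Or.inl h1)
    · have hieq : i = ps.length := by
        have : (ps ++ [p]).length = ps.length + 1 := by simp
        omega
      subst hieq
      have hrow : pvRow (ps ++ [p]) ps.length = p.2 := by
        unfold pvRow
        rw [List.getD_eq_getElem?_getD]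
        simp
      rw [hrow] at hv
      have hdrop : (ps ++ [p]).drop (ps.length + 1) = [] := by
        apply List.drop_eq_nil_of_le
        simp
      simp [hv, hdrop]

-- pyRange(m-1, -1, -1) enumerates m-1, m-2, …, 0
theorem pvPyRange_down_map (m : Nat) :
    PySem.List.pyRange ((m : Int) - 1) (-1) (-1)
      = (List.range m).map (fun k : Nat => ((m : Int) - 1) - (k : Int)) := by
  unfold PySem.List.pyRange
  rcases Nat.eq_zero_or_pos m with hm | hm
  · subst hm; simp
  · have h1 : (-1 : Int) < (m : Int) - 1 := by omega
    have h2 : ¬ ((-1 : Int) = 0) := by decide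
    have h3 : ¬ ((0:Int) < -1) := by decide
    simp only [h2, if_false, h3, h1, if_true]
    have h4 : ((m : Int) - 1 - (-1) + -(-1) - 1) / -(-1) = (m : Int) := by
      norm_num
    rw [h4]
    simp only [Int.toNat_natCast]
    apply List.map_congr_left
    intro k _
    ring

theorem pvRange_reverse_map (m : Nat) :
    ((List.range m).reverse).map (fun i : Nat => (i : Int))
      = (List.range m).map (fun k : Nat => ((m : Int) - 1) - (k : Int)) := by
  induction m with
  | zero => rfl
  | succ m ih =>
    conv_lhs => rw [List.range_succ]
    conv_rhs => rw [List.range_succ_eq_map]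
    simp only [List.reverse_append, List.reverse_singleton, List.singleton_append,
      List.map_cons, List.map_map]
    refine List.cons_eq_cons.mpr ⟨by push_cast; ring, ?_⟩
    rw [ih]
    apply List.map_congr_left
    intro k _
    simp only [Function.comp]
    push_cast
    ring

-- B's scan equals the reference scan
theorem pvAlt_eq_ref (rows : List (List String)) (line_nums : List Int)
    (h : List.zip line_nums rows ≠ []) :
    disjointed_py_alt rows line_nums
      = pvRef (List.zip line_nums rows) ((List.zip line_nums rows).length - 1) := by
  simp only [disjointed_py_alt]
  set pairs := List.zip line_nums rows with hpairs
  have hlen : 1 ≤ pairs.length := by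
    have := List.length_pos_of_ne_nil h
    omega
  have hcast : (pairs.length : Int) - 2 = ((pairs.length - 1 : Nat) : Int) - 1 := by
    omega
  rw [hcast, pvPyRange_down_map, ← pvRange_reverse_map, pvFindSome?_map]
  unfold pvRef
  apply pvFindSome?_congr
  intro i hi
  have hilt : i < pairs.length - 1 := by
    rw [List.mem_reverse, List.mem_range] at hi
    exact hi
  have higet : PySem.List.pyGet? pairs (i : Int) = some (pairs.getD i (0, [])) := by
    rw [PySem.List.pyGet?_natCast, List.getD_eq_getElem?_getD,
      List.getElem?_eq_getElem (by omega)]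
    rfl
  rw [higet]
  have hcond : ((pairs.getD i (0, [])).2.all (fun v => (pvBuildLastOcc pairs).get? v == some (i : Int)))
      = pvCond pairs i := by
    unfold pvCond pvRow
    rw [Bool.eq_iff_iff]
    simp only [List.all_eq_true]
    constructor
    · intro hall v hv
      have h1 := hall v hv
      rw [beq_iff_eq] at h1
      have h2 := (pvLastOcc_char pairs i v (by omega) hv).1 h1
      simp only [Bool.not_eq_eq_eq_not, Bool.not_true, List.contains_eq_mem,
        decide_eq_false_iff_not]
      exact h2
    · intro hall v hv
      have h1 := hall v hv
      simp only [Bool.not_eq_eq_eq_not, Bool.not_true, List.contains_eq_mem,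
        decide_eq_false_iff_not] at h1
      rw [beq_iff_eq]
      exact (pvLastOcc_char pairs i v (by omega) hv).2 h1
  simp only [hcond]
  cases hcase : pvCond pairs i <;> simp [pvNum]

-- A's scan equals the reference scan
theorem pvA_eq_ref (rows : List (List String)) (line_nums : List Int)
    (h : List.zip line_nums rows ≠ []) :
    disjointed_py rows line_nums
      = pvRef (List.zip line_nums rows) ((List.zip line_nums rows).length - 1) := by
  unfold disjointed_py
  set pairs := List.zip line_nums rows with hpairs
  cases hrev : pairs.reverse with
  | nil => exact absurd (by simpa using hrev) h
  | cons hd tl =>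
    obtain ⟨num, last⟩ := hd
    simp only
    have hpe : pairs = tl.reverse ++ [(num, last)] := by
      have := congrArg List.reverse hrev
      simpa using this
    have hlen : pairs.length = tl.length + 1 := by rw [hpe]; simp
    have htl : tl = (pairs.take (pairs.length - 1)).reverse := by
      rw [hpe]
      have : (tl.reverse ++ [(num, last)]).length - 1 = tl.reverse.length := by simp
      rw [this, List.take_left]
      simp
    rw [pvLoopA_eq_specR, htl]
    have hflat : List.flatten [last] = last := by simp
    rw [hflat]
    apply pvSpecR_eq_ref
    · omega
    · intro v
      have hdrop : pairs.drop (pairs.length - 1) = [(num, last)] := by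
        rw [hpe]
        have : (tl.reverse ++ [(num, last)]).length - 1 = tl.reverse.length := by simp
        rw [this, List.drop_left]
      rw [hdrop]
      simp

-- ===== VERDICT (by name: the statement is the Claim_ definition above) =====
theorem disjointed_py_spec : Claim_equal_disjointed_py := by
  intro rows line_nums _ hpre
  obtain ⟨hr, hn⟩ := hpre
  have hz : List.zip line_nums rows ≠ [] := by
    intro hzip
    rcases List.zip_eq_nil_iff.1 hzip with h | h
    · exact hn h
    · exact hr h
  unfold Spec_disjointed_py
  rw [pvA_eq_ref rows line_nums hz, pvAlt_eq_ref rows line_nums hz]
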